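-- pv_equiv track=rewrite | github.com/Mortalus/ThreatModeling_PoC | attack_path_analyzer.py | _calculate_combined_likelihood
-- ===== SOURCE A (Python) =====
-- from typing import List, Dict, Set, Optional, Tuple, Any, Union
-- from enum import Enum
--
-- class ThreatLikelihood(str, Enum):
--     LOW = "Low"
--     MEDIUM = "Medium"
--     HIGH = "High"
--
-- def _calculate_combined_likelihood(threats: List[Dict]) -> ThreatLikelihood:
--     """Calculate the combined likelihood of a threat chain."""
--     if not threats:
--         return ThreatLikelihood.LOW
--
--     likelihood_values = {
--         ThreatLikelihood.HIGH: 3,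
--         ThreatLikelihood.MEDIUM: 2,
--         ThreatLikelihood.LOW: 1
--     }
--
--     # Use the minimum likelihood (weakest link)
--     min_likelihood = ThreatLikelihood.HIGH
--     min_value = 3
--
--     for threat in threats:
--         likelihood_str = threat.get('likelihood', 'Medium')
--         try:
--             likelihood = ThreatLikelihood(likelihood_str)
--             if likelihood_values[likelihood] < min_value:
--                 min_value = likelihood_values[likelihood]
--                 min_likelihood = likelihood
--         except ValueError:
--             continue
--
--     return min_likelihood
-- ===== SOURCE B (Python) =====
-- from typing import List, Dict
-- from enum import Enum
--
-- class ThreatLikelihood(str, Enum):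
--     LOW = "Low"
--     MEDIUM = "Medium"
--     HIGH = "High"
--
-- def _calculate_combined_likelihood(threats: List[Dict]) -> ThreatLikelihood:
--     """Weakest-link likelihood: collect the valid likelihoods once, then pick by precedence."""
--     if not threats:
--         return ThreatLikelihood.LOW
--     valid = []
--     for threat in threats:
--         try:
--             valid.append(ThreatLikelihood(threat.get('likelihood', 'Medium')))
--         except ValueError:
--             continue
--     if ThreatLikelihood.LOW in valid:
--         return ThreatLikelihood.LOW
--     if ThreatLikelihood.MEDIUM in valid:
--         return ThreatLikelihood.MEDIUM
--     return ThreatLikelihood.HIGH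
-- ===== Notes on version B (the rewrite author's own statement) =====
-- stated objective: simpler
-- what changed: Replaces the running (min_likelihood, min_value) numeric-minimum accumulator with a single collect-the-valid-likelihoods pass followed by a precedence membership test (Low, else Medium, else High).
import Mathlib
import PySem

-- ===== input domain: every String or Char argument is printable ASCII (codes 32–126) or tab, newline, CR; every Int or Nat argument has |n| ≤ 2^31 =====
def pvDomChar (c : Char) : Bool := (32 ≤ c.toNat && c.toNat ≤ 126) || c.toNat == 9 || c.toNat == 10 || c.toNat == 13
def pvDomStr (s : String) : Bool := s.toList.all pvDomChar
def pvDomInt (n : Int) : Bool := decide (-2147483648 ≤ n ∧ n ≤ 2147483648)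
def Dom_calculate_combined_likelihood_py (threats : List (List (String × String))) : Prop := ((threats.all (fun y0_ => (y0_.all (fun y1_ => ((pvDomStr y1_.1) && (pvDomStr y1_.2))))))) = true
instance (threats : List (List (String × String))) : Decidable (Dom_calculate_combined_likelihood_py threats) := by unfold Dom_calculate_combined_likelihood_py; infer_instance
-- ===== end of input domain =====

-- B replaces A's running (min_likelihood, min_value) accumulator with one collect-valid-likelihoods
-- pass followed by a precedence membership test (Low, else Medium, else High); objective: simpler.


-- ===== PORT A =====
-- threat.get('likelihood', 'Medium')
def pvLikelihoodStr (t : List (String × String)) : String :=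
  PySem.Dict.getD (PySem.Dict.mk t) "likelihood" "Medium"

-- ThreatLikelihood(s) succeeds exactly on the three member values
def pvIsValid (s : String) : Bool :=
  s = "Low" || s = "Medium" || s = "High"

-- likelihood_values[likelihood]
def pvLikelihoodValue (s : String) : Int :=
  if s = "High" then 3 else if s = "Medium" then 2 else 1

-- loop body of A: state is (min_likelihood, min_value)
def pvStepA (st : String × Int) (t : List (String × String)) : String × Int :=
  let likelihood_str := pvLikelihoodStr t
  if pvIsValid likelihood_str then
    if pvLikelihoodValue likelihood_str < st.2 then
      (likelihood_str, pvLikelihoodValue likelihood_str)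
    else st
  else st

def calculate_combined_likelihood_py (threats : List (List (String × String))) : String :=
  if threats = [] then "Low"
  else (threats.foldl pvStepA ("High", 3)).1

-- ===== PORT B =====
-- one collecting pass: the valid likelihood of a threat, none where ThreatLikelihood(...) raises
def pvValid? (t : List (String × String)) : Option String :=
  let s := pvLikelihoodStr t
  if pvIsValid s then some s else none

def calculate_combined_likelihood_py_alt (threats : List (List (String × String))) : String :=
  if threats = [] then "Low"
  else
    let valid := threats.filterMap pvValid?
    if valid.contains "Low" then "Low"
    else if valid.contains "Medium" then "Medium"
    else "High"

-- ===== PRECONDITION & SPEC =====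
def Spec_calculate_combined_likelihood_py (threats : List (List (String × String))) (out : String) : Prop := out = calculate_combined_likelihood_py_alt threats
instance (threats : List (List (String × String))) (out : String) : Decidable (Spec_calculate_combined_likelihood_py threats out) := by unfold Spec_calculate_combined_likelihood_py; infer_instance

-- ===== CLAIM (what is proved, stated in full; the proofs are below) =====
def Claim_equal_calculate_combined_likelihood_py : Prop := ∀ (threats : List (List (String × String))), Dom_calculate_combined_likelihood_py threats → Spec_calculate_combined_likelihood_py threats (calculate_combined_likelihood_py threats)

-- ===== LEMMAS AND PROOFS =====

-- the value B's precedence test computes, seeded with the current minimum `a`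
def pvComb (a : String) (vals : List String) : String :=
  if a = "Low" ∨ vals.contains "Low" then "Low"
  else if a = "Medium" ∨ vals.contains "Medium" then "Medium"
  else "High"

-- weakest of the current minimum and one more valid likelihood (A's update step)
def pvMin2 (a s : String) : String :=
  if pvLikelihoodValue s < pvLikelihoodValue a then s else a

theorem pvComb_cons (a s : String) (vals : List String)
    (ha : a = "Low" ∨ a = "Medium" ∨ a = "High")
    (hs : s = "Low" ∨ s = "Medium" ∨ s = "High") :
    pvComb a (s :: vals) = pvComb (pvMin2 a s) vals := by
  rcases ha with h | h | h <;> rcases hs with h' | h' | h' <;> subst h <;> subst h' <;>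
    simp [pvMin2, pvLikelihoodValue, pvComb]

-- A's fold from a self-consistent state computes the precedence combination of the valid likelihoods
theorem pvFoldA_eq_comb (ts : List (List (String × String))) :
    ∀ a : String, a = "Low" ∨ a = "Medium" ∨ a = "High" →
    (ts.foldl pvStepA (a, pvLikelihoodValue a)).1 = pvComb a (ts.filterMap pvValid?) := by
  induction ts with
  | nil =>
      intro a ha
      rcases ha with h | h | h <;> subst h <;> simp [pvComb]
  | cons t ts ih =>
      intro a ha
      by_cases hv : pvIsValid (pvLikelihoodStr t)
      · have hs : pvLikelihoodStr t = "Low" ∨ pvLikelihoodStr t = "Medium" ∨ pvLikelihoodStr t = "High" := by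
          simp [pvIsValid] at hv; tauto
        have hfm : (t :: ts).filterMap pvValid? = pvLikelihoodStr t :: ts.filterMap pvValid? := by
          simp [pvValid?, hv]
        have hstep : pvStepA (a, pvLikelihoodValue a) t =
            (pvMin2 a (pvLikelihoodStr t), pvLikelihoodValue (pvMin2 a (pvLikelihoodStr t))) := by
          rcases hs with h | h | h <;> rcases ha with h' | h' | h' <;>
            simp [pvStepA, pvMin2, pvIsValid, pvLikelihoodValue, h, h']
        have hmem : pvMin2 a (pvLikelihoodStr t) = "Low" ∨ pvMin2 a (pvLikelihoodStr t) = "Medium" ∨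
            pvMin2 a (pvLikelihoodStr t) = "High" := by
          rcases hs with h | h | h <;> rcases ha with h' | h' | h' <;>
            simp [pvMin2, pvLikelihoodValue, h, h']
        rw [List.foldl_cons, hstep, hfm, ih _ hmem, pvComb_cons a _ _ ha hs]
      · have hstep : pvStepA (a, pvLikelihoodValue a) t = (a, pvLikelihoodValue a) := by
          simp [pvStepA, hv]
        have hfm : (t :: ts).filterMap pvValid? = ts.filterMap pvValid? := by
          simp [pvValid?, hv]
        rw [List.foldl_cons, hstep, hfm]
        exact ih a ha

-- ===== VERDICT (by name: the statement is the Claim_ definition above) =====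
theorem calculate_combined_likelihood_py_spec : Claim_equal_calculate_combined_likelihood_py := by
  intro threats _
  unfold Spec_calculate_combined_likelihood_py calculate_combined_likelihood_py calculate_combined_likelihood_py_alt
  by_cases h : threats = []
  · simp [h]
  · have := pvFoldA_eq_comb threats "High" (by tauto)
    have hval : pvLikelihoodValue "High" = 3 := by rfl
    rw [hval] at this
    simp [h, this, pvComb]
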